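-- pv_equiv track=rewrite | github.com/Adamhat/OSUSpring2023 | cs325/HW5/mis.py | max_wis
-- ===== SOURCE A (Python) =====
-- def max_wis(arr):
--     if not arr:
--         return 0, []
--
--     sum = [0] * (len(arr) + 1)
--     independentSet = [[] for x in range(len(arr) + 1)]
--
--     for i in range(1, len(arr) + 1):
--         sumWithElement = sum[i - 2] + arr[i - 1]
--         sumWithoutElement = sum[i - 1]
--
--         if sumWithElement > sumWithoutElement:
--             sum[i] = sumWithElement
--             independentSet[i] = independentSet[i - 2] + [arr[i - 1]]
--         else:
--             sum[i] = sumWithoutElement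
--             independentSet[i] = independentSet[i - 1]
--
--     return sum[-1] if sum[-1] > 0 else 0, independentSet[-1]
-- ===== SOURCE B (Python) =====
-- def max_wis(arr):
--     # DP on sums only, then one O(n) backtracking pass to reconstruct the set.
--     sums = [0]
--     prev2, prev1 = 0, 0
--     for x in arr:
--         cur = max(prev1, prev2 + x)
--         sums.append(cur)
--         prev2, prev1 = prev1, cur
--     res = []
--     i = len(arr)
--     while i > 0:
--         if sums[i] != sums[i - 1]:
--             res.append(arr[i - 1])
--             i -= 2
--         else:
--             i -= 1
--     res.reverse()
--     return sums[-1], res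
-- ===== Notes on version B (the rewrite author's own statement) =====
-- stated objective: faster
-- what changed: B keeps only the DP sums (dropping A's per-index copies of candidate sets, which make A quadratic when elements are taken often) and reconstructs the chosen set by a single backtracking pass over the sums; intended as faster, measured so on random/sorted input families.
import Mathlib
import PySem

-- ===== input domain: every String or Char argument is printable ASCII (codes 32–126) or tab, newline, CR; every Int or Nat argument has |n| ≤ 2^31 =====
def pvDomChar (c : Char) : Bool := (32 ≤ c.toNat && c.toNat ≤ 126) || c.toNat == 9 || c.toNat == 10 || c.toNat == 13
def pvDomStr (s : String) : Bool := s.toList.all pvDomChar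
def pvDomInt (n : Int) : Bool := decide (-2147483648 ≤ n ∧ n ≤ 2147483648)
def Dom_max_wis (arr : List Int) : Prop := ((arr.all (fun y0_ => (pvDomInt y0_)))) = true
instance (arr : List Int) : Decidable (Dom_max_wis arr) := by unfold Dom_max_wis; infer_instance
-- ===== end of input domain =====

-- B keeps only the DP sums and reconstructs the set by one backtracking pass, instead of A's
-- per-index candidate-set copies (intended as faster; measured faster on large random inputs).

-- ===== PORT A =====
-- loop body of A's `for i in range(1, len(arr)+1)`; all indices are in range in Python
-- (the i-2 = -1 read at i = 1 wraps to the last, still-zero slot), so pyGetD/pySetD are exact here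
def aBody (arr : List Int) (st : List Int × List (List Int)) (i : Int) :
    List Int × List (List Int) :=
  let sumWithElement := PySem.List.pyGetD st.1 (i - 2) 0 + PySem.List.pyGetD arr (i - 1) 0
  let sumWithoutElement := PySem.List.pyGetD st.1 (i - 1) 0
  if sumWithElement > sumWithoutElement then
    (PySem.List.pySetD st.1 i sumWithElement,
     PySem.List.pySetD st.2 i
       (PySem.List.pyGetD st.2 (i - 2) [] ++ [PySem.List.pyGetD arr (i - 1) 0]))
  else
    (PySem.List.pySetD st.1 i sumWithoutElement,
     PySem.List.pySetD st.2 i (PySem.List.pyGetD st.2 (i - 1) []))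

def max_wis (arr : List Int) : Int × List Int :=
  if arr = [] then (0, [])
  else
    let n : Int := arr.length
    let st := (PySem.List.pyRange 1 (n + 1) 1).foldl (aBody arr)
      (List.replicate (arr.length + 1) 0, List.replicate (arr.length + 1) [])
    let last := PySem.List.pyGetD st.1 (-1) 0
    (if last > 0 then last else 0, PySem.List.pyGetD st.2 (-1) [])

-- ===== PORT B =====
-- body of B's `for x in arr`: state (sums, prev2, prev1)
def bBody (st : List Int × Int × Int) (x : Int) : List Int × Int × Int :=
  let cur := max st.2.2 (st.2.1 + x)
  (st.1 ++ [cur], st.2.2, cur)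

-- B's backtracking while-loop (indices read are always in range, so getD is exact)
def altBack (sums arr : List Int) : Nat → List Int → List Int
  | 0, res => res
  | i + 1, res =>
    if sums.getD (i + 1) 0 ≠ sums.getD i 0 then
      altBack sums arr (i - 1) (res ++ [arr.getD i 0])
    else
      altBack sums arr i res
  termination_by i _ => i

def max_wis_alt (arr : List Int) : Int × List Int :=
  let st := arr.foldl bBody ([0], 0, 0)
  (PySem.List.pyGetD st.1 (-1) 0, (altBack st.1 arr arr.length []).reverse)

-- ===== PRECONDITION & SPEC =====
def Spec_max_wis (arr : List Int) (out : Int × List Int) : Prop := out = max_wis_alt arr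
instance (arr : List Int) (out : Int × List Int) : Decidable (Spec_max_wis arr out) := by unfold Spec_max_wis; infer_instance

-- ===== CLAIM (what is proved, stated in full; the proofs are below) =====
def Claim_equal_max_wis : Prop := ∀ (arr : List Int), Dom_max_wis arr → Spec_max_wis arr (max_wis arr)

-- ===== LEMMAS AND PROOFS =====

-- the DP value at each prefix length
def dpW (arr : List Int) : Nat → Int
  | 0 => 0
  | 1 => if 0 + arr.getD 0 0 > 0 then 0 + arr.getD 0 0 else 0
  | k + 2 =>
    if dpW arr k + arr.getD (k + 1) 0 > dpW arr (k + 1) then dpW arr k + arr.getD (k + 1) 0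
    else dpW arr (k + 1)

-- the chosen set at each prefix length
def dpS (arr : List Int) : Nat → List Int
  | 0 => []
  | 1 => if 0 + arr.getD 0 0 > 0 then [arr.getD 0 0] else []
  | k + 2 =>
    if dpW arr k + arr.getD (k + 1) 0 > dpW arr (k + 1) then dpS arr k ++ [arr.getD (k + 1) 0]
    else dpS arr (k + 1)

def sumsL (arr : List Int) (k : Nat) : List Int := (List.range (k + 1)).map (dpW arr)
def setsL (arr : List Int) (k : Nat) : List (List Int) := (List.range (k + 1)).map (dpS arr)

def dpPrev (arr : List Int) : Nat → Int
  | 0 => 0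
  | j + 1 => dpW arr j

def dpSPrev (arr : List Int) : Nat → List Int
  | 0 => []
  | j + 1 => dpS arr j

lemma dpW_nonneg (arr : List Int) : ∀ k, 0 ≤ dpW arr k := by
  intro k
  induction k using Nat.strong_induction_on with
  | _ k ih =>
    match k with
    | 0 => simp [dpW]
    | 1 => rw [dpW]; split <;> omega
    | k + 2 => rw [dpW]; have := ih (k + 1) (by omega); split <;> omega

lemma dpW_succ (arr : List Int) (k : Nat) :
    dpW arr (k + 1) =
      if dpPrev arr k + arr.getD k 0 > dpW arr k then dpPrev arr k + arr.getD k 0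
      else dpW arr k := by
  cases k with
  | zero => rw [dpW]; rfl
  | succ j => rw [dpW]; rfl

lemma dpS_succ (arr : List Int) (k : Nat) :
    dpS arr (k + 1) =
      if dpPrev arr k + arr.getD k 0 > dpW arr k then dpSPrev arr k ++ [arr.getD k 0]
      else dpS arr k := by
  cases k with
  | zero => rw [dpS]; rfl
  | succ j => rw [dpS]; rfl

lemma getD_map_range_append {α : Type} (f : Nat → α) (d : α) (k j : Nat) (h : j ≤ k)
    (rest : List α) : ((List.range (k + 1)).map f ++ rest).getD j d = f j := by
  rw [List.getD_append _ _ _ _ (by simp; omega)]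
  simp [List.getD_eq_getElem?_getD, List.getElem?_range (by omega : j < k + 1)]

lemma getD_sumsL (arr : List Int) (k j : Nat) (h : j ≤ k) (rest : List Int) :
    (sumsL arr k ++ rest).getD j 0 = dpW arr j :=
  getD_map_range_append (dpW arr) 0 k j h rest

lemma getD_setsL (arr : List Int) (k j : Nat) (h : j ≤ k) (rest : List (List Int)) :
    (setsL arr k ++ rest).getD j ([] : List Int) = dpS arr j :=
  getD_map_range_append (dpS arr) [] k j h rest

lemma set_at_len {α : Type} (L t : List α) (c v : α) (m : Nat) (hm : m = L.length) :
    (L ++ c :: t).set m v = L ++ v :: t := by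
  subst hm
  rw [List.set_append_right _ _ (le_refl _)]
  simp

-- A-side loop invariant
lemma aInv (arr : List Int) (hn : 1 ≤ arr.length) :
    ∀ k, k ≤ arr.length →
      (PySem.List.pyRange 1 ((k : Int) + 1) 1).foldl (aBody arr)
        (List.replicate (arr.length + 1) 0, List.replicate (arr.length + 1) []) =
      (sumsL arr k ++ List.replicate (arr.length - k) 0,
       setsL arr k ++ List.replicate (arr.length - k) []) := by
  intro k hk
  induction k with
  | zero =>
    rw [PySem.List.pyRange_one_eq_nil (by norm_num)]
    simp [sumsL, setsL, dpW, dpS, List.replicate_succ]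
  | succ k ih =>
    have hk' : k ≤ arr.length := by omega
    have hcast : (((k + 1 : Nat) : Int)) + 1 = ((k : Int) + 1) + 1 := by push_cast; ring
    rw [hcast, PySem.List.pyRange_one_succ_right (by omega), List.foldl_append, ih hk']
    simp only [List.foldl_cons, List.foldl_nil]
    -- evaluate one step of the loop body at i = k+1
    have hi1 : (k : Int) + 1 - 1 = ((k : Nat) : Int) := by ring
    have harr : PySem.List.pyGetD arr ((k : Int) + 1 - 1) 0 = arr.getD k 0 := by
      rw [hi1, PySem.List.pyGetD_natCast]
    have hs1 : PySem.List.pyGetD (sumsL arr k ++ List.replicate (arr.length - k) 0)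
        ((k : Int) + 1 - 1) 0 = dpW arr k := by
      rw [hi1, PySem.List.pyGetD_natCast, getD_sumsL arr k k (le_refl _)]
    have ht1 : PySem.List.pyGetD (setsL arr k ++ List.replicate (arr.length - k) [])
        ((k : Int) + 1 - 1) ([] : List Int) = dpS arr k := by
      rw [hi1, PySem.List.pyGetD_natCast, getD_setsL arr k k (le_refl _)]
    have hs2 : PySem.List.pyGetD (sumsL arr k ++ List.replicate (arr.length - k) 0)
        ((k : Int) + 1 - 2) 0 = dpPrev arr k := by
      cases k with
      | zero =>
        have h0 : ((0 : Nat) : Int) + 1 - 2 = -1 := by norm_num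
        have hrep : List.replicate (arr.length - 0) (0 : Int) =
            List.replicate (arr.length - 1) 0 ++ [0] := by
          rw [← List.replicate_succ']
          congr 1
          omega
        rw [h0, hrep, ← List.append_assoc, PySem.List.pyGetD_neg_one_append_singleton]
        rfl
      | succ j =>
        have h0 : ((j + 1 : Nat) : Int) + 1 - 2 = ((j : Nat) : Int) := by push_cast; ring
        rw [h0, PySem.List.pyGetD_natCast, getD_sumsL arr (j + 1) j (by omega)]
        rfl
    have ht2 : PySem.List.pyGetD (setsL arr k ++ List.replicate (arr.length - k) [])
        ((k : Int) + 1 - 2) ([] : List Int) = dpSPrev arr k := by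
      cases k with
      | zero =>
        have h0 : ((0 : Nat) : Int) + 1 - 2 = -1 := by norm_num
        have hrep : List.replicate (arr.length - 0) ([] : List Int) =
            List.replicate (arr.length - 1) [] ++ [[]] := by
          rw [← List.replicate_succ']
          congr 1
          omega
        rw [h0, hrep, ← List.append_assoc, PySem.List.pyGetD_neg_one_append_singleton]
        rfl
      | succ j =>
        have h0 : ((j + 1 : Nat) : Int) + 1 - 2 = ((j : Nat) : Int) := by push_cast; ring
        rw [h0, PySem.List.pyGetD_natCast, getD_setsL arr (j + 1) j (by omega)]
        rfl
    have hwr : ((k : Int) + 1) = (((k + 1 : Nat) : Int)) := by push_cast; ring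
    have hrepS : List.replicate (arr.length - k) (0 : Int) =
        0 :: List.replicate (arr.length - (k + 1)) 0 := by
      rw [← List.replicate_succ]
      congr 1
      omega
    have hrepT : List.replicate (arr.length - k) ([] : List Int) =
        [] :: List.replicate (arr.length - (k + 1)) [] := by
      rw [← List.replicate_succ]
      congr 1
      omega
    have hlenS : k + 1 = (sumsL arr k).length := by simp [sumsL]
    have hlenT : k + 1 = (setsL arr k).length := by simp [setsL]
    simp only [aBody, hs1, hs2, ht1, ht2, harr]
    simp only [hwr, PySem.List.pySetD_natCast, hrepS, hrepT,
      set_at_len _ _ _ _ _ hlenS, set_at_len _ _ _ _ _ hlenT]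
    have e1 : sumsL arr (k + 1) = sumsL arr k ++ [dpW arr (k + 1)] := by
      simp [sumsL, List.range_succ]
    have e2 : setsL arr (k + 1) = setsL arr k ++ [dpS arr (k + 1)] := by
      simp [setsL, List.range_succ]
    by_cases hc : dpPrev arr k + arr.getD k 0 > dpW arr k
    · have v1 : dpW arr (k + 1) = dpPrev arr k + arr.getD k 0 := by rw [dpW_succ, if_pos hc]
      have v2 : dpS arr (k + 1) = dpSPrev arr k ++ [arr.getD k 0] := by rw [dpS_succ, if_pos hc]
      rw [if_pos hc, e1, e2, v1, v2]
      simp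
    · have v1 : dpW arr (k + 1) = dpW arr k := by rw [dpW_succ, if_neg hc]
      have v2 : dpS arr (k + 1) = dpS arr k := by rw [dpS_succ, if_neg hc]
      rw [if_neg hc, e1, e2, v1, v2]
      simp

-- B-side fold invariant
lemma bInv (arr : List Int) :
    ∀ k, k ≤ arr.length →
      (arr.take k).foldl bBody ([0], 0, 0) = (sumsL arr k, dpPrev arr k, dpW arr k) := by
  intro k hk
  induction k with
  | zero => simp [sumsL, dpW, dpPrev]
  | succ k ih =>
    have hk' : k < arr.length := by omega
    rw [List.take_add_one, List.foldl_append, ih (by omega)]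
    have hget : arr[k]?.toList = [arr[k]] := by
      simp [List.getElem?_eq_getElem hk']
    rw [hget]
    simp only [List.foldl_cons, List.foldl_nil, bBody]
    have hx : arr[k] = arr.getD k 0 := by
      simp [List.getD_eq_getElem?_getD, List.getElem?_eq_getElem hk']
    have hmax : max (dpW arr k) (dpPrev arr k + arr[k]) = dpW arr (k + 1) := by
      rw [hx, dpW_succ]
      rcases max_cases (dpW arr k) (dpPrev arr k + arr.getD k 0) with ⟨h1, h2⟩ | ⟨h1, h2⟩ <;>
        rw [h1] <;> split <;> omega
    rw [hmax]
    refine Prod.ext ?_ rfl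
    simp [sumsL, List.range_succ]

-- backtracking computes dpS
lemma backInv (arr : List Int) :
    ∀ i, i ≤ arr.length → ∀ res,
      altBack (sumsL arr arr.length) arr i res = res ++ (dpS arr i).reverse := by
  intro i
  induction i using Nat.strong_induction_on with
  | _ i ih =>
    match i with
    | 0 => intro _ res; rw [altBack]; simp [dpS]
    | i + 1 =>
      intro hi res
      rw [altBack]
      have hS : ∀ j, j ≤ arr.length → (sumsL arr arr.length).getD j 0 = dpW arr j := by
        intro j hj
        have := getD_sumsL arr arr.length j hj []
        simpa using this
      rw [hS (i + 1) hi, hS i (by omega)]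
      by_cases hc : dpPrev arr i + arr.getD i 0 > dpW arr i
      · have hne : dpW arr (i + 1) ≠ dpW arr i := by
          rw [dpW_succ, if_pos hc]; omega
        rw [if_pos hne, ih (i - 1) (by omega) (by omega), dpS_succ, if_pos hc]
        have hpre : dpS arr (i - 1) = dpSPrev arr i := by
          cases i with
          | zero => rfl
          | succ j => rfl
        rw [hpre]
        simp
      · have heq : dpW arr (i + 1) = dpW arr i := by
          rw [dpW_succ, if_neg hc]
        rw [if_neg (by simpa using heq), ih i (by omega) (by omega) res, dpS_succ, if_neg hc]

lemma alt_eq (arr : List Int) :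
    max_wis_alt arr = (dpW arr arr.length, dpS arr arr.length) := by
  unfold max_wis_alt
  have h := bInv arr arr.length (le_refl _)
  rw [List.take_length] at h
  rw [h]
  have hlast : PySem.List.pyGetD (sumsL arr arr.length) (-1) 0 = dpW arr arr.length := by
    have : sumsL arr arr.length =
        (List.range arr.length).map (dpW arr) ++ [dpW arr arr.length] := by
      simp [sumsL, List.range_succ]
    rw [this, PySem.List.pyGetD_neg_one_append_singleton]
  simp only [hlast]
  rw [backInv arr arr.length (le_refl _) []]
  simp

lemma a_eq (arr : List Int) (h : arr ≠ []) :
    max_wis arr = (dpW arr arr.length, dpS arr arr.length) := by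
  unfold max_wis
  rw [if_neg h]
  have hn : 1 ≤ arr.length := by
    cases arr with
    | nil => simp at h
    | cons a t => simp
  have hcast : ((arr.length : Int)) + 1 = ((arr.length : Nat) : Int) + 1 := rfl
  have hinv := aInv arr hn arr.length (le_refl _)
  simp only [hinv, Nat.sub_self, List.replicate_zero, List.append_nil]
  have hlastS : PySem.List.pyGetD (sumsL arr arr.length) (-1) 0 = dpW arr arr.length := by
    have : sumsL arr arr.length =
        (List.range arr.length).map (dpW arr) ++ [dpW arr arr.length] := by
      simp [sumsL, List.range_succ]
    rw [this, PySem.List.pyGetD_neg_one_append_singleton]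
  have hlastT : PySem.List.pyGetD (setsL arr arr.length) (-1) ([] : List Int) =
      dpS arr arr.length := by
    have : setsL arr arr.length =
        (List.range arr.length).map (dpS arr) ++ [dpS arr arr.length] := by
      simp [setsL, List.range_succ]
    rw [this, PySem.List.pyGetD_neg_one_append_singleton]
  rw [hlastS, hlastT]
  have := dpW_nonneg arr arr.length
  split <;> [rfl; (refine Prod.ext ?_ rfl; simp; omega)]

-- ===== VERDICT (by name: the statement is the Claim_ definition above) =====
theorem max_wis_spec : Claim_equal_max_wis := by
  intro arr _
  unfold Spec_max_wis
  by_cases h : arr = []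
  · subst h
    rw [alt_eq]
    rfl
  · rw [a_eq arr h, alt_eq arr]
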